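-- pv_equiv track=rewrite | github.com/Freecey/py-video-make-yt | video_maker/encoder.py | _parse_ffmpeg_error
-- ===== SOURCE A (Python) =====
-- _ERROR_MARKERS = ("[error]", "error:", "invalid", "cannot", "no such", "not found", "failed")
--
-- def _parse_ffmpeg_error(stderr: str | None) -> str:
--     """Extract the last meaningful error lines from ffmpeg stderr."""
--     if not stderr:
--         return "ffmpeg failed (no stderr output)"
--     lines = stderr.strip().splitlines()
--     error_lines: list[str] = []
--     for line in reversed(lines):
--         stripped = line.strip()
--         if not stripped:
--             continue
--         lower = stripped.lower()
--         if any(marker in lower for marker in _ERROR_MARKERS):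
--             error_lines.append(stripped)
--         if len(error_lines) >= 5:
--             break
--     if not error_lines:
--         for line in reversed(lines):
--             if line.strip():
--                 error_lines.append(line.strip())
--             if len(error_lines) >= 3:
--                 break
--     return "\n".join(reversed(error_lines))
-- ===== SOURCE B (Python) =====
-- _ERROR_MARKERS = ("[error]", "error:", "invalid", "cannot", "no such", "not found", "failed")
--
-- def _parse_ffmpeg_error(stderr):
--     """Extract the last meaningful error lines from ffmpeg stderr."""
--     if not stderr:
--         return "ffmpeg failed (no stderr output)"
--     lines = stderr.strip().splitlines()
--     stripped = [s for s in (ln.strip() for ln in lines) if s]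
--     matches = [s for s in stripped if any(m in s.lower() for m in _ERROR_MARKERS)]
--     if matches:
--         return "\n".join(matches[-5:])
--     return "\n".join(stripped[-3:])
-- ===== Notes on version B (the rewrite author's own statement) =====
-- stated objective: simpler
-- what changed: Replaced A's two reversed scans with bounded accumulators and early breaks by forward filter-everything comprehensions followed by tail slices (matches[-5:] / stripped[-3:]), removing the reversal and break logic.
import Mathlib
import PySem

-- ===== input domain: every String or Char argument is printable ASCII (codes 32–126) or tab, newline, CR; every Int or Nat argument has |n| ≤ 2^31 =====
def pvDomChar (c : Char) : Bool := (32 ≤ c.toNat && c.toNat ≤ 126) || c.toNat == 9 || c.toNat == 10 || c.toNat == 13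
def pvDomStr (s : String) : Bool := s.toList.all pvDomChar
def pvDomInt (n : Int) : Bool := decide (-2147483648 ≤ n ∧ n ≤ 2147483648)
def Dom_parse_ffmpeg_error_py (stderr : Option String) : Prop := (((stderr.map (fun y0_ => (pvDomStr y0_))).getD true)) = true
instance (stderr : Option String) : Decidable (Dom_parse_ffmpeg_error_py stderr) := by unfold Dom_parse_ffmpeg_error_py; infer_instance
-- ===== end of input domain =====

-- B replaces A's two reversed bounded-accumulator scans (with early break) by forward
-- filter-everything passes followed by tail slices ([-5:] / [-3:]); objective: simpler.

def pvMarkers : List String :=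
  ["[error]", "error:", "invalid", "cannot", "no such", "not found", "failed"]

-- `any(marker in t.lower() for marker in _ERROR_MARKERS)`, shared by both ports
def pvQ (t : String) : Bool := pvMarkers.any (fun m => PySem.Str.isIn m (PySem.Str.lower t))

-- ===== PORT A =====
-- first loop of A: reversed scan, skip blank lines, collect marker lines, break at 5
def pvALoop1 : List String → List String → List String
  | [], acc => acc
  | line :: rest, acc =>
    let stripped := PySem.Str.strip line
    if stripped = "" then pvALoop1 rest acc
    else
      let acc' := if pvQ stripped then acc ++ [stripped] else acc
      if 5 ≤ acc'.length then acc' else pvALoop1 rest acc'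

-- fallback loop of A: reversed scan, collect non-blank stripped lines, break at 3
def pvALoop2 : List String → List String → List String
  | [], acc => acc
  | line :: rest, acc =>
    let acc' := if PySem.Str.strip line ≠ "" then acc ++ [PySem.Str.strip line] else acc
    if 3 ≤ acc'.length then acc' else pvALoop2 rest acc'

def parse_ffmpeg_error_py (stderr : Option String) : String :=
  match stderr with
  | none => "ffmpeg failed (no stderr output)"
  | some s =>
    if s = "" then "ffmpeg failed (no stderr output)"
    else
      let lines := PySem.Str.splitlines (PySem.Str.strip s)
      let error_lines := pvALoop1 lines.reverse []
      let error_lines := if error_lines = [] then pvALoop2 lines.reverse [] else error_lines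
      PySem.Str.join "\n" error_lines.reverse

-- ===== PORT B =====
def parse_ffmpeg_error_py_alt (stderr : Option String) : String :=
  match stderr with
  | none => "ffmpeg failed (no stderr output)"
  | some s =>
    if s = "" then "ffmpeg failed (no stderr output)"
    else
      let lines := PySem.Str.splitlines (PySem.Str.strip s)
      let stripped := (lines.map PySem.Str.strip).filter (fun t => t ≠ "")
      let hits := stripped.filter pvQ
      if hits ≠ [] then PySem.Str.join "\n" (PySem.List.slice hits (some (-5)) none)
      else PySem.Str.join "\n" (PySem.List.slice stripped (some (-3)) none)

-- ===== PRECONDITION & SPEC =====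
def Spec_parse_ffmpeg_error_py (stderr : Option String) (out : String) : Prop := out = parse_ffmpeg_error_py_alt stderr
instance (stderr : Option String) (out : String) : Decidable (Spec_parse_ffmpeg_error_py stderr out) := by unfold Spec_parse_ffmpeg_error_py; infer_instance

-- ===== CLAIM (what is proved, stated in full; the proofs are below) =====
def Claim_equal_parse_ffmpeg_error_py : Prop := ∀ (stderr : Option String), Dom_parse_ffmpeg_error_py stderr → Spec_parse_ffmpeg_error_py stderr (parse_ffmpeg_error_py stderr)

-- ===== LEMMAS AND PROOFS =====

-- loop 1 collects, from the scanned list, the first (up to 5 - |acc|) stripped non-blank marker lines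
theorem pvALoop1_eq (l : List String) : ∀ acc : List String, acc.length < 5 →
    pvALoop1 l acc =
      acc ++ (((l.map PySem.Str.strip).filter (fun t => decide (t ≠ "") && pvQ t)).take (5 - acc.length)) := by
  induction l with
  | nil => intro acc _; simp [pvALoop1]
  | cons line rest ih =>
    intro acc hacc
    simp only [pvALoop1, List.map_cons, List.filter_cons]
    by_cases hs : PySem.Str.strip line = ""
    · simp [hs, ih acc hacc]
    · by_cases hq : pvQ (PySem.Str.strip line) = true
      · have hcond : (decide (PySem.Str.strip line ≠ "") && pvQ (PySem.Str.strip line)) = true := by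
          simp [hs, hq]
        simp only [if_neg hs, if_pos hq, hcond]
        by_cases h5 : 5 ≤ (acc ++ [PySem.Str.strip line]).length
        · have h4 : acc.length = 4 := by simp at h5; omega
          simp [h4, List.take_succ_cons]
        · simp only [if_neg h5]
          have hlen : (acc ++ [PySem.Str.strip line]).length < 5 := by omega
          rw [ih _ hlen]
          have hexp : 5 - acc.length = (5 - (acc ++ [PySem.Str.strip line]).length) + 1 := by
            simp; simp at hlen; omega
          simp [hexp, List.take_succ_cons]
      · have hcond : (decide (PySem.Str.strip line ≠ "") && pvQ (PySem.Str.strip line)) = false := by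
          simp [hq]
        have h5 : ¬ 5 ≤ acc.length := by omega
        simp only [if_neg hs, if_neg hq, hcond, Bool.false_eq_true, if_neg h5,
          if_false]
        exact ih acc hacc

-- loop 2 collects the first (up to 3 - |acc|) stripped non-blank lines
theorem pvALoop2_eq (l : List String) : ∀ acc : List String, acc.length < 3 →
    pvALoop2 l acc =
      acc ++ (((l.map PySem.Str.strip).filter (fun t => t ≠ "")).take (3 - acc.length)) := by
  induction l with
  | nil => intro acc _; simp [pvALoop2]
  | cons line rest ih =>
    intro acc hacc
    simp only [pvALoop2, List.map_cons, List.filter_cons]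
    by_cases hs : PySem.Str.strip line = ""
    · have h3 : ¬ 3 ≤ acc.length := by omega
      simp [hs, h3, ih acc hacc]
    · simp only [if_pos (by simpa using hs : PySem.Str.strip line ≠ ""), decide_eq_true_eq]
      by_cases h3 : 3 ≤ (acc ++ [PySem.Str.strip line]).length
      · have h2 : acc.length = 2 := by simp at h3; omega
        simp [h2, List.take_succ_cons]
      · simp only [if_neg h3]
        have hlen : (acc ++ [PySem.Str.strip line]).length < 3 := by omega
        rw [ih _ hlen]
        have hexp : 3 - acc.length = (3 - (acc ++ [PySem.Str.strip line]).length) + 1 := by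
          simp; simp at hlen; omega
        simp [hexp, List.take_succ_cons]

-- taking the first n of the reverse, then reversing, is the tail slice
theorem pvRevTake (xs : List String) (n : Nat) :
    (xs.reverse.take n).reverse = xs.drop (xs.length - n) := by
  rw [List.take_reverse, List.reverse_reverse]

-- the two filters of B composed are A's combined predicate
theorem pvFilterFilter (l : List String) :
    ((l.map PySem.Str.strip).filter (fun t => t ≠ "")).filter pvQ =
      (l.map PySem.Str.strip).filter (fun t => decide (t ≠ "") && pvQ t) := by
  rw [List.filter_filter]
  simp [Bool.and_comm]

-- the common core on a line list: A's reversed scans give B's tail slices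
theorem pvCore (lines : List String) :
    (let error_lines := pvALoop1 lines.reverse []
     let error_lines := if error_lines = [] then pvALoop2 lines.reverse [] else error_lines
     PySem.Str.join "\n" error_lines.reverse) =
    (let stripped := (lines.map PySem.Str.strip).filter (fun t => t ≠ "")
     let hits := stripped.filter pvQ
     if hits ≠ [] then PySem.Str.join "\n" (PySem.List.slice hits (some (-5)) none)
     else PySem.Str.join "\n" (PySem.List.slice stripped (some (-3)) none)) := by
  simp only []
  set stripped := (lines.map PySem.Str.strip).filter (fun t => t ≠ "") with hstr
  set hits := stripped.filter pvQ with hhits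
  have h1 : pvALoop1 lines.reverse [] = (hits.reverse).take 5 := by
    rw [pvALoop1_eq lines.reverse [] (by simp)]
    simp only [List.nil_append, List.length_nil, Nat.sub_zero]
    rw [hhits, hstr, pvFilterFilter, List.map_reverse, List.filter_reverse]
  have h2 : pvALoop2 lines.reverse [] = (stripped.reverse).take 3 := by
    rw [pvALoop2_eq lines.reverse [] (by simp)]
    simp only [List.nil_append, List.length_nil, Nat.sub_zero]
    rw [hstr, List.map_reverse, List.filter_reverse]
  rw [h1]
  by_cases hh : hits = []
  · rw [h2]
    simp only [hh, List.reverse_nil, List.take_nil]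
    rw [if_pos trivial, if_neg (by simp : ¬ (([] : List String) ≠ [])), pvRevTake,
      PySem.List.slice_from_neg_ofNat stripped 3 (by omega)]
  · have hne : hits.reverse.take 5 ≠ [] := by
      simp [List.take_eq_nil_iff, hh]
    rw [if_neg hne, if_pos hh, pvRevTake]
    rw [PySem.List.slice_from_neg_ofNat hits 5 (by omega)]

-- ===== VERDICT (by name: the statement is the Claim_ definition above) =====
theorem parse_ffmpeg_error_py_spec : Claim_equal_parse_ffmpeg_error_py := by
  intro stderr _
  show parse_ffmpeg_error_py stderr = parse_ffmpeg_error_py_alt stderr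
  match stderr with
  | none => rfl
  | some s =>
    simp only [parse_ffmpeg_error_py, parse_ffmpeg_error_py_alt]
    by_cases hs : s = ""
    · simp [hs]
    · simp only [if_neg hs]
      exact pvCore (PySem.Str.splitlines (PySem.Str.strip s))
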